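-- pv_equiv track=rewrite | github.com/YueHua46/auto_send_imessage | lingxing_openapi.py | split_time_windows
-- ===== SOURCE A (Python) =====
-- MAX_QUERY_SPAN_DAYS = 31
--
-- def split_time_windows(end_ts: int, lookback_days: int, window_days: int = MAX_QUERY_SPAN_DAYS) -> list[tuple[int, int]]:
--     """
--     把较长的时间段切分为多个不超过window_days（默认31天）的窗口，便于分批拉取
--     :param end_ts: 查询结束时间戳（一般为当前时间）
--     :param lookback_days: 需要往前回看天数
--     :param window_days: 每个时间窗口最多天数
--     :return: 时间窗口元组(start_ts, end_ts)列表，按升序排列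
--     """
--     if lookback_days <= 0:
--         raise ValueError("lookback_days 必须大于0")
--     if window_days <= 0:
--         raise ValueError("window_days 必须大于0")
--     windows: list[tuple[int, int]] = []
--     cursor_end = end_ts
--     earliest_start = end_ts - lookback_days * 24 * 60 * 60
--     chunk_seconds = window_days * 24 * 60 * 60
--
--     while cursor_end > earliest_start:
--         # 窗口起点不能更早于回溯区间
--         cursor_start = max(earliest_start, cursor_end - chunk_seconds + 1)
--         windows.append((cursor_start, cursor_end))
--         cursor_end = cursor_start - 1
--
--     windows.reverse()
--     return windows
-- ===== SOURCE B (Python) =====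
-- MAX_QUERY_SPAN_DAYS = 31
--
-- def split_time_windows(end_ts: int, lookback_days: int, window_days: int = MAX_QUERY_SPAN_DAYS) -> list[tuple[int, int]]:
--     """Closed-form window count + one forward (ascending) loop; no reverse."""
--     if lookback_days <= 0:
--         raise ValueError("lookback_days 必须大于0")
--     if window_days <= 0:
--         raise ValueError("window_days 必须大于0")
--     lookback_seconds = lookback_days * 86400
--     chunk_seconds = window_days * 86400
--     n = -(-lookback_seconds // chunk_seconds)  # ceil: number of windows
--     earliest_start = end_ts - lookback_seconds
--     first_end = end_ts - (n - 1) * chunk_seconds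
--     windows = [(max(earliest_start, first_end - chunk_seconds + 1), first_end)]
--     prev_end = first_end
--     for _ in range(n - 1):
--         windows.append((prev_end + 1, prev_end + chunk_seconds))
--         prev_end += chunk_seconds
--     return windows
-- ===== Notes on version B (the rewrite author's own statement) =====
-- stated objective: alternative
-- what changed: Replaces A's backward while-loop (walking cursor_end down from end_ts, appending, then reversing) with a closed-form ceiling-division window count, a directly computed bottom window, and one forward loop appending ascending full-chunk windows, so no reverse is needed.
import Mathlib
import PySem

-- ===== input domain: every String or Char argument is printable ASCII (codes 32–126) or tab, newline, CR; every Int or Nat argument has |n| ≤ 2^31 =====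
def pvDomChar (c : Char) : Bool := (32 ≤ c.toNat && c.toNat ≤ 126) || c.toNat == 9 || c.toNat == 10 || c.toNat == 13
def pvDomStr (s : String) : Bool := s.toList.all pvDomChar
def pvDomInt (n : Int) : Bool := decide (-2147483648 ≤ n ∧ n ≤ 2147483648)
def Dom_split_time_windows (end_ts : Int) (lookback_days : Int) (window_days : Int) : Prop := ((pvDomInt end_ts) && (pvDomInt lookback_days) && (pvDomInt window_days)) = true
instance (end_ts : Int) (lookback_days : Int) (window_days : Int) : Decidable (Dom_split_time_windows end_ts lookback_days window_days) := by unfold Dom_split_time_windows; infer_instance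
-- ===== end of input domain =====

-- B replaces A's backward while-loop-then-reverse by a closed-form window count and one
-- forward (ascending) append loop; objective: alternative decomposition, same cost.

-- ===== PORT A =====
-- A's while loop: cursor_end walks down from end_ts; each step appends one window,
-- then the list is reversed.  The `0 < chunk` conjunct only makes the recursion
-- total (Python reaches the loop only when window_days > 0, guaranteed by Pre_).
def loopA (earliest chunk cursor_end : Int) (acc : List (Int × Int)) : List (Int × Int) :=
  if _h : earliest < cursor_end ∧ 0 < chunk then
    let cs := max earliest (cursor_end - chunk + 1)
    loopA earliest chunk (cs - 1) (acc ++ [(cs, cursor_end)])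
  else acc
termination_by (cursor_end - earliest).toNat
decreasing_by omega

def split_time_windows (end_ts : Int) (lookback_days : Int) (window_days : Int) : List (Int × Int) :=
  if lookback_days ≤ 0 then []        -- Python: raise ValueError (excluded by Pre_)
  else if window_days ≤ 0 then []     -- Python: raise ValueError (excluded by Pre_)
  else
    let earliest_start := end_ts - lookback_days * 24 * 60 * 60
    let chunk_seconds := window_days * 24 * 60 * 60
    (loopA earliest_start chunk_seconds end_ts []).reverse

-- ===== PORT B =====
-- B's forward for-loop over range(n-1): appends one ascending window per step.
def loopB (chunk prev_end : Int) (k : Nat) (acc : List (Int × Int)) : List (Int × Int) :=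
  match k with
  | 0 => acc
  | Nat.succ k => loopB chunk (prev_end + chunk) k (acc ++ [(prev_end + 1, prev_end + chunk)])

def split_time_windows_alt (end_ts : Int) (lookback_days : Int) (window_days : Int) : List (Int × Int) :=
  if lookback_days ≤ 0 then []        -- Python: raise ValueError (excluded by Pre_)
  else if window_days ≤ 0 then []     -- Python: raise ValueError (excluded by Pre_)
  else
    let lookback_seconds := lookback_days * 86400
    let chunk_seconds := window_days * 86400
    let n := -(PySem.Int.floordiv (-lookback_seconds) chunk_seconds)  -- ceil division
    let earliest_start := end_ts - lookback_seconds
    let first_end := end_ts - (n - 1) * chunk_seconds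
    loopB chunk_seconds first_end (n - 1).toNat
      [(max earliest_start (first_end - chunk_seconds + 1), first_end)]

-- ===== PRECONDITION & SPEC =====
-- Pre_ excludes exactly the inputs where Python A raises ValueError (a nonpositive day count).
def Pre_split_time_windows (end_ts : Int) (lookback_days : Int) (window_days : Int) : Prop :=
  0 < lookback_days ∧ 0 < window_days
instance (end_ts : Int) (lookback_days : Int) (window_days : Int) : Decidable (Pre_split_time_windows end_ts lookback_days window_days) := by unfold Pre_split_time_windows; infer_instance
def pvWitness_split_time_windows : Int × Int × Int := (1000000, 65, 31)

def Spec_split_time_windows (end_ts : Int) (lookback_days : Int) (window_days : Int) (out : List (Int × Int)) : Prop := out = split_time_windows_alt end_ts lookback_days window_days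
instance (end_ts : Int) (lookback_days : Int) (window_days : Int) (out : List (Int × Int)) : Decidable (Spec_split_time_windows end_ts lookback_days window_days out) := by unfold Spec_split_time_windows; infer_instance

-- ===== CLAIM (what is proved, stated in full; the proofs are below) =====
def Claim_equal_split_time_windows : Prop := ∀ (end_ts : Int) (lookback_days : Int) (window_days : Int), Dom_split_time_windows end_ts lookback_days window_days → Pre_split_time_windows end_ts lookback_days window_days → Spec_split_time_windows end_ts lookback_days window_days (split_time_windows end_ts lookback_days window_days)

-- ===== LEMMAS AND PROOFS =====

theorem loopA_acc (earliest chunk ce : Int) : ∀ (acc : List (Int × Int)),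
    loopA earliest chunk ce acc = acc ++ loopA earliest chunk ce [] := by
  generalize hm : (ce - earliest).toNat = m
  induction m using Nat.strong_induction_on generalizing ce with
  | _ m ih =>
    intro acc
    conv_lhs => rw [loopA]
    conv_rhs => rw [loopA]
    split_ifs with h
    · rw [ih ((max earliest (ce - chunk + 1) - 1 - earliest).toNat) (by omega) _ rfl,
          ih ((max earliest (ce - chunk + 1) - 1 - earliest).toNat) (by omega) _ rfl ([] ++ _)]
      simp
    · simp

theorem loopB_acc (chunk : Int) (k : Nat) : ∀ (pe : Int) (acc : List (Int × Int)),
    loopB chunk pe k acc = acc ++ loopB chunk pe k [] := by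
  induction k with
  | zero => intro pe acc; simp [loopB]
  | succ k ih =>
      intro pe acc
      rw [loopB, loopB, ih, ih (pe + chunk) ([] ++ _)]
      simp

theorem loopB_snoc (chunk : Int) (k : Nat) : ∀ (pe : Int),
    loopB chunk pe (k + 1) [] = loopB chunk pe k [] ++ [(pe + k * chunk + 1, pe + k * chunk + chunk)] := by
  induction k with
  | zero => intro pe; simp [loopB]
  | succ k ih =>
      intro pe
      have e1 : loopB chunk pe (k + 1 + 1) [] = [(pe + 1, pe + chunk)] ++ loopB chunk (pe + chunk) (k + 1) [] := by
        conv_lhs => rw [loopB]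
        rw [loopB_acc]; simp
      have e2 : loopB chunk pe (k + 1) [] = [(pe + 1, pe + chunk)] ++ loopB chunk (pe + chunk) k [] := by
        conv_lhs => rw [loopB]
        rw [loopB_acc]; simp
      rw [e1, ih (pe + chunk), e2]
      have h1 : pe + chunk + (k : Int) * chunk + 1 = pe + (((k:Nat)+1 : Nat) : Int) * chunk + 1 := by push_cast; ring
      have h2 : pe + chunk + (k : Int) * chunk + chunk = pe + (((k:Nat)+1 : Nat) : Int) * chunk + chunk := by push_cast; ring
      simp [h1, h2]

-- descent lemma: starting k chunks above a bottom window ending at fe,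
-- A's loop (reversed) is the bottom window followed by B's k ascending windows.
theorem loopA_reverse (earliest chunk fe : Int) (hc : 0 < chunk)
    (h1 : earliest < fe) (h2 : fe - chunk ≤ earliest) : ∀ (k : Nat),
    (loopA earliest chunk (fe + k * chunk) []).reverse
      = (max earliest (fe - chunk + 1), fe) :: loopB chunk fe k [] := by
  intro k
  induction k with
  | zero =>
      have hz : fe + ((0:Nat):Int) * chunk = fe := by push_cast; ring
      rw [hz, loopA, dif_pos ⟨h1, hc⟩, loopA, dif_neg (by omega)]
      simp [loopB]
  | succ k ih =>
      have hk : 0 ≤ (k : Int) * chunk := mul_nonneg (by positivity) hc.le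
      have hcast : fe + (((k:Nat)+1 : Nat) : Int) * chunk = fe + (k:Int) * chunk + chunk := by push_cast; ring
      rw [hcast, loopA, dif_pos ⟨by omega, hc⟩]
      have hcs : max earliest (fe + (k:Int) * chunk + chunk - chunk + 1) = fe + (k:Int) * chunk + 1 := by omega
      have hm1 : fe + (k:Int) * chunk + 1 - 1 = fe + (k:Int) * chunk := by ring
      rw [hcs]
      simp only []
      rw [hm1, loopA_acc]
      simp only [List.reverse_append, List.nil_append, List.reverse_cons, List.reverse_nil]
      rw [ih, loopB_snoc]
      simp

theorem main_eq (e ld wd : Int) (hl : 0 < ld) (hw : 0 < wd) :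
    split_time_windows e ld wd = split_time_windows_alt e ld wd := by
  unfold split_time_windows split_time_windows_alt
  rw [if_neg (by omega), if_neg (by omega), if_neg (by omega), if_neg (by omega)]
  simp only []
  have hA : ld * 24 * 60 * 60 = ld * 86400 := by ring
  have hB : wd * 24 * 60 * 60 = wd * 86400 := by ring
  rw [hA, hB]
  set lb := ld * 86400 with hlb
  set chunk := wd * 86400 with hchunk
  have hlb0 : 0 < lb := by omega
  have hc : 0 < chunk := by omega
  set n := -(PySem.Int.floordiv (-lb) chunk) with hn
  have hceil : (n - 1) * chunk < lb ∧ lb ≤ n * chunk :=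
    (PySem.Int.neg_floordiv_neg_eq_iff_of_pos hc).mp hn.symm
  have hn1 : 1 ≤ n := by nlinarith [hceil.2, hc]
  have hkcast : (((n - 1).toNat : Nat) : Int) = n - 1 := by omega
  set fe := e - (n - 1) * chunk with hfe
  have hEnd : e = fe + (((n - 1).toNat : Nat) : Int) * chunk := by rw [hkcast, hfe]; ring
  have hfull : (n - 1) * chunk + chunk = n * chunk := by ring
  have h1' : fe + (((n - 1).toNat : Nat) : Int) * chunk - lb < fe := by rw [hkcast]; linarith [hceil.1]
  have h2' : fe - chunk ≤ fe + (((n - 1).toNat : Nat) : Int) * chunk - lb := by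
    rw [hkcast]; linarith [hceil.2, hfull]
  rw [hEnd, loopB_acc, loopA_reverse _ chunk fe hc h1' h2' ((n - 1).toNat)]
  simp

-- ===== VERDICT (by name: the statement is the Claim_ definition above) =====
theorem split_time_windows_spec : Claim_equal_split_time_windows := by
  intro e ld wd _ hpre
  unfold Spec_split_time_windows
  exact main_eq e ld wd hpre.1 hpre.2
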